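-- pv_equiv track=rewrite | github.com/DANU011/CodingTest | DANU/python/16120.py | check_ppap
-- ===== SOURCE A (Python) =====
-- def check_ppap(s):
--     ppap = []
--     ans = 'NP'
--
--     for i in s:
--         ppap.append(i)
--         if len(ppap) >= 4 and ppap[-4:] == ['P', 'P', 'A', 'P']:
--             for _ in range(3):
--                 ppap.pop()
--
--     if len(ppap) == 1 and ppap[0] == 'P':
--         ans = 'PPAP'
--
--     return ans
-- ===== SOURCE B (Python) =====
-- def check_ppap(s):
--     while 'PPAP' in s:
--         s = s.replace('PPAP', 'P')
--     return 'PPAP' if s == 'P' else 'NP'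
-- ===== Notes on version B (the rewrite author's own statement) =====
-- stated objective: faster
-- what changed: Replaced the single-pass stack that inspects and pops the last four elements by a fixpoint loop that repeatedly rewrites every occurrence of the pattern to a single character and tests the normal form.
import Mathlib
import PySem

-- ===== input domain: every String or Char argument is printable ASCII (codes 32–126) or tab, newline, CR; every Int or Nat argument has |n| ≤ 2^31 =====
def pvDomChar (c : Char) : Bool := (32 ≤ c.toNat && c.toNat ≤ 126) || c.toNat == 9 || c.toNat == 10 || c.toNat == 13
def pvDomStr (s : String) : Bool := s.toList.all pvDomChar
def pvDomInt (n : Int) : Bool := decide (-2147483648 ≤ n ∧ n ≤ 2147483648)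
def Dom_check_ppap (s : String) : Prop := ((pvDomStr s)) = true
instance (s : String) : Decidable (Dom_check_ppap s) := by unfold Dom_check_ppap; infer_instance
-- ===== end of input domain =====

-- B replaces A's one-pass last-four-elements stack by a fixpoint loop that repeatedly rewrites
-- the four-character pattern to one character until none is left (measured faster in CPython,
-- where str.replace runs in C while A loops per character).

-- ===== PORT A =====
-- loop body of A's for-loop (append, check ppap[-4:], pop three times)
def aStep (ppap0 : List Char) (i : Char) : List Char :=
  let ppap := ppap0 ++ [i]
  if 4 ≤ ppap.length ∧ PySem.List.slice ppap (some (-4)) none = ['P', 'P', 'A', 'P'] then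
    -- for _ in range(3): ppap.pop()  — pop() on a list of length ≥ 4, exact as dropLast
    (List.range 3).foldl (fun l _ => l.dropLast) ppap
  else ppap

def check_ppap (s : String) : String :=
  let ppap := s.toList.foldl aStep []
  let ans := "NP"
  -- len(ppap) == 1 and ppap[0] == 'P' : short-circuit guarantees the index is in range
  if ppap.length = 1 ∧ PySem.List.pyGetD ppap 0 ' ' = 'P' then "PPAP" else ans

-- ===== PORT B =====
-- helpers needed by ppapLoop's termination proof (they characterise PySem.Chars.replace)
def ppapPat : List Char := ['P', 'P', 'A', 'P']

-- structural form of str.replace('PPAP','P') (leftmost, non-overlapping)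
def repPPAP : List Char → List Char
  | [] => []
  | c :: t =>
    if ppapPat.isPrefixOf (c :: t) then 'P' :: repPPAP (t.drop 3) else c :: repPPAP t
termination_by l => l.length
decreasing_by all_goals (simp only [List.length_drop, List.length_cons]; omega)

theorem goPPAP_eq_rep : ∀ (fuel : Nat) (l acc : List Char), l.length ≤ fuel →
    PySem.Chars.replace.go ppapPat ['P'] fuel l acc = acc.reverse ++ repPPAP l := by
  intro fuel
  induction fuel using Nat.strong_induction_on with
  | _ fuel ih =>
    intro l acc hlen
    match fuel, l with
    | 0, l =>
      have : l = [] := by cases l <;> simp_all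
      subst this; simp [PySem.Chars.replace.go]; rw [repPPAP]
    | (f + 1), [] => simp [PySem.Chars.replace.go]; rw [repPPAP]
    | (f + 1), (c :: t) =>
      rw [PySem.Chars.replace.go]
      by_cases hp : ppapPat.isPrefixOf (c :: t)
      · have hlt : (List.drop ppapPat.length (c :: t)).length ≤ f := by
          simp [ppapPat] at *; omega
        rw [if_pos hp, ih f (by omega) _ _ hlt]
        have : List.drop ppapPat.length (c :: t) = t.drop 3 := by simp [ppapPat]
        rw [this, repPPAP, if_pos hp]; simp
      · have hlt : t.length ≤ f := by simp at hlen; omega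
        rw [if_neg hp, ih f (by omega) _ _ hlt, repPPAP, if_neg hp]; simp

theorem replacePPAP_eq_rep (l : List Char) :
    PySem.Chars.replace l ppapPat ['P'] = repPPAP l := by
  rw [PySem.Chars.replace]
  simp only [ppapPat, List.isEmpty_cons]
  exact goPPAP_eq_rep l.length l [] (le_refl _)

theorem repPPAP_len_le : ∀ l : List Char, (repPPAP l).length ≤ l.length := by
  intro l
  fun_induction repPPAP l with
  | case1 => simp
  | case2 c t hp ih =>
    have := List.IsPrefix.length_le (List.isPrefixOf_iff_prefix.mp hp)
    simp [ppapPat] at this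
    simp at ih ⊢; omega
  | case3 c t hp ih => simpa using ih

theorem repPPAP_len_lt : ∀ l : List Char, ppapPat <:+: l → (repPPAP l).length < l.length := by
  intro l
  fun_induction repPPAP l with
  | case1 => intro h; simp [ppapPat] at h
  | case2 c t hp ih =>
    intro _
    have h4 : 4 ≤ (c :: t).length := by
      have := List.IsPrefix.length_le (List.isPrefixOf_iff_prefix.mp hp)
      simpa [ppapPat] using this
    have := repPPAP_len_le (t.drop 3)
    simp at h4 this ⊢; omega
  | case3 c t hp ih =>
    intro hinf
    have ht : ppapPat <:+: t := by
      obtain ⟨pre, suf, hps⟩ := hinf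
      match pre with
      | [] => exact absurd (List.isPrefixOf_iff_prefix.mpr ⟨suf, by simpa using hps⟩) hp
      | a :: pre' =>
        have h2 : a :: (pre' ++ ppapPat ++ suf) = c :: t := by
          simpa only [List.cons_append] using hps
        exact ⟨pre', suf, ((List.cons.injEq _ _ _ _).mp h2).2⟩
    have := ih ht
    simp at this ⊢; omega

theorem replacePPAP_len_lt (l : List Char) (h : PySem.Chars.isIn ppapPat l = true) :
    (PySem.Chars.replace l ppapPat ['P']).length < l.length := by
  rw [replacePPAP_eq_rep]
  exact repPPAP_len_lt l ((PySem.Chars.isIn_iff_infix _ _).mp h)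

-- while 'PPAP' in s: s = s.replace('PPAP','P')   (Python str ported via toList, exact)
def ppapLoop (l : List Char) : List Char :=
  if h : PySem.Chars.isIn ['P', 'P', 'A', 'P'] l then
    ppapLoop (PySem.Chars.replace l ['P', 'P', 'A', 'P'] ['P'])
  else l
termination_by l.length
decreasing_by exact replacePPAP_len_lt l h

def check_ppap_alt (s : String) : String :=
  if ppapLoop s.toList = ['P'] then "PPAP" else "NP"

-- ===== PRECONDITION & SPEC =====
def Spec_check_ppap (s : String) (out : String) : Prop := out = check_ppap_alt s
instance (s : String) (out : String) : Decidable (Spec_check_ppap s out) := by unfold Spec_check_ppap; infer_instance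

-- ===== CLAIM (what is proved, stated in full; the proofs are below) =====
def Claim_equal_check_ppap : Prop := ∀ (s : String), Dom_check_ppap s → Spec_check_ppap s (check_ppap s)

-- ===== LEMMAS AND PROOFS =====

-- A's step on the reversed stack
def rstep (r : List Char) (c : Char) : List Char :=
  if c = 'P' ∧ r.take 3 = ['A', 'P', 'P'] then 'P' :: r.drop 3 else c :: r

-- feeding 'PPAP' into any stack equals feeding 'P' (the rewrite is invisible to A's stack)
theorem rstep_ppap (r : List Char) :
    rstep (rstep (rstep (rstep r 'P') 'P') 'A') 'P' = rstep r 'P' := by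
  by_cases h : r.take 3 = ['A', 'P', 'P']
  · have e1 : rstep r 'P' = 'P' :: r.drop 3 := by rw [rstep, if_pos ⟨rfl, h⟩]
    have e2 : rstep ('P' :: r.drop 3) 'P' = 'P' :: 'P' :: r.drop 3 := by
      rw [rstep, if_neg (by simp)]
    have e3 : rstep ('P' :: 'P' :: r.drop 3) 'A' = 'A' :: 'P' :: 'P' :: r.drop 3 := by
      rw [rstep, if_neg (by simp)]
    have e4 : rstep ('A' :: 'P' :: 'P' :: r.drop 3) 'P' = 'P' :: r.drop 3 := by
      rw [rstep, if_pos ⟨rfl, by simp⟩]; simp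
    rw [e1, e2, e3, e4]
  · have e1 : rstep r 'P' = 'P' :: r := by rw [rstep, if_neg (by simp [h])]
    have e2 : rstep ('P' :: r) 'P' = 'P' :: 'P' :: r := by rw [rstep, if_neg (by simp)]
    have e3 : rstep ('P' :: 'P' :: r) 'A' = 'A' :: 'P' :: 'P' :: r := by
      rw [rstep, if_neg (by simp)]
    have e4 : rstep ('A' :: 'P' :: 'P' :: r) 'P' = 'P' :: r := by
      rw [rstep, if_pos ⟨rfl, by simp⟩]; simp
    rw [e1, e2, e3, e4]

theorem aStep_eq_rstep (st : List Char) (c : Char) :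
    aStep st c = (rstep st.reverse c).reverse := by
  unfold aStep
  dsimp only
  rw [PySem.List.slice_from_neg_ofNat (st ++ [c]) 4 (by norm_num)]
  have hdrop : (st ++ [c]).drop ((st ++ [c]).length - 4) = (c :: st.reverse.take 3).reverse := by
    have := List.take_reverse (xs := st ++ [c]) (i := 4)
    have h2 : (st ++ [c]).reverse.take 4 = c :: st.reverse.take 3 := by
      simp [List.take_succ_cons]
    rw [h2] at this
    rw [this, List.reverse_reverse]
  rw [hdrop]
  have hiff : (c :: st.reverse.take 3).reverse = ['P', 'P', 'A', 'P'] ↔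
      c = 'P' ∧ st.reverse.take 3 = ['A', 'P', 'P'] := by
    rw [show (['P', 'P', 'A', 'P'] : List Char) = ['P', 'A', 'P', 'P'].reverse from rfl]
    rw [List.reverse_inj]
    constructor
    · intro h; exact ⟨(List.cons.injEq _ _ _ _ |>.mp h).1, by
        have := (List.cons.injEq _ _ _ _ |>.mp h).2
        cases hst : st.reverse.take 3 <;> simp_all⟩
    · rintro ⟨rfl, h⟩; rw [h]
  by_cases hc : c = 'P' ∧ st.reverse.take 3 = ['A', 'P', 'P']
  · have h3 : 3 ≤ st.length := by
      have := congrArg List.length hc.2; simp at this; omega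
    rw [if_pos ⟨by simp; omega, hiff.mpr hc⟩, rstep, if_pos hc]
    obtain ⟨rfl, htake⟩ := hc
    have hst : st = (st.reverse.drop 3).reverse ++ ['P', 'P', 'A'] := by
      conv_lhs => rw [← List.reverse_reverse st]
      conv_lhs => rw [← List.take_append_drop 3 st.reverse, htake]
      simp
    rw [show List.range 3 = [0, 1, 2] from rfl]
    simp only [List.foldl_cons, List.foldl_nil]
    conv_lhs => rw [hst]
    simp
  · rw [if_neg (by rw [hiff]; tauto), rstep, if_neg hc]
    simp

theorem foldA_eq (l : List Char) : ∀ st : List Char,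
    l.foldl aStep st = (l.foldl rstep st.reverse).reverse := by
  induction l with
  | nil => intro st; simp
  | cons c t ih =>
    intro st
    simp only [List.foldl_cons]
    rw [aStep_eq_rstep, ih, List.reverse_reverse]

theorem no_red (l : List Char) : ∀ st : List Char,
    ¬ ppapPat <:+: (st.reverse ++ l) → l.foldl rstep st = l.reverse ++ st := by
  induction l with
  | nil => intro st _; simp
  | cons c t ih =>
    intro st hni
    have hstep : rstep st c = c :: st := by
      rw [rstep, if_neg]
      rintro ⟨rfl, htake⟩
      apply hni
      have hst : st = 'A' :: 'P' :: 'P' :: st.drop 3 := by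
        conv_lhs => rw [← List.take_append_drop 3 st, htake]
        rfl
      refine ⟨(st.drop 3).reverse, t, ?_⟩
      conv_rhs => rw [hst]
      simp [ppapPat]
    simp only [List.foldl_cons, hstep]
    rw [ih (c :: st) (by simpa using hni)]
    simp

theorem rep_run (l : List Char) : ∀ st : List Char,
    (repPPAP l).foldl rstep st = l.foldl rstep st := by
  fun_induction repPPAP l with
  | case1 => intro st; rfl
  | case2 c t hp ih =>
    intro st
    have hl : c :: t = ppapPat ++ t.drop 3 := by
      obtain ⟨u, hu⟩ := List.isPrefixOf_iff_prefix.mp hp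
      have : u = t.drop 3 := by
        have := congrArg (List.drop 4) hu
        simpa [ppapPat] using this
      rw [← hu, this]
    conv_rhs => rw [hl]
    rw [List.foldl_cons, ih]
    show List.foldl rstep (rstep st 'P') (t.drop 3) = _
    rw [List.foldl_append]
    congr 1
    exact (rstep_ppap st).symm
  | case3 c t hp ih =>
    intro st
    simp only [List.foldl_cons, ih]

theorem ppapLoop_run (l : List Char) :
    (ppapLoop l).foldl rstep ([] : List Char) = l.foldl rstep ([] : List Char)
      ∧ ¬ ppapPat <:+: ppapLoop l := by
  fun_induction ppapLoop l with
  | case1 l h ih =>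
    refine ⟨?_, ih.2⟩
    rw [ih.1, show (['P','P','A','P'] : List Char) = ppapPat from rfl, replacePPAP_eq_rep, rep_run]
  | case2 l h =>
    exact ⟨rfl, (PySem.Chars.isIn_eq_false_iff _ _).mp (by simpa [ppapPat] using h)⟩

theorem stack_eq_loop (l : List Char) : l.foldl aStep [] = ppapLoop l := by
  rw [foldA_eq]
  simp only [List.reverse_nil]
  have h := ppapLoop_run l
  have hnf := no_red (ppapLoop l) [] (by simpa using h.2)
  rw [← h.1, hnf]
  simp

-- ===== VERDICT (by name: the statement is the Claim_ definition above) =====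
theorem check_ppap_spec : Claim_equal_check_ppap := by
  intro s _
  unfold Spec_check_ppap check_ppap check_ppap_alt
  rw [stack_eq_loop]
  rcases h : ppapLoop s.toList with _ | ⟨c, t⟩
  · simp
  · by_cases hc : c = 'P' ∧ t = []
    · obtain ⟨rfl, rfl⟩ := hc; simp [PySem.List.pyGetD_zero_cons]
    · have : ¬ (c :: t = ['P']) := by simpa using fun h1 h2 => hc ⟨h1, h2⟩
      simp [PySem.List.pyGetD_zero_cons, this]
      intro hlen hoops
      cases t <;> simp_all
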